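-- pv_equiv track=rewrite | github.com/ShivaniSuthar/Spotify-Playlist | hw07tester.py | create_palindrome_v1
-- ===== SOURCE A (Python) =====
-- def create_palindrome_v1(start, end):
--     """
--     Creates a palindrome of integers starting from start, ending at end
--     (in the middle) All inputs are positive integers. No input validation
--     required.
--     Parameters: start, end (int), positive integers
--     Returns: palindrome sequence (str)
--     Restrictions. You should use recursion in this question.
--     >>> create_palindrome_v1(1, 1)
--     '1'
--     >>> create_palindrome_v1(3, 5)
--     '34543'
--     >>> create_palindrome_v1(5, 2)
--     '5432345'
--
--     # Add your doctests below here #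
--     >>> create_palindrome_v1(1, 2)
--     '121'
--     >>> create_palindrome_v1(2, 1)
--     '212'
--     >>> create_palindrome_v1(1, 9)
--     '12345678987654321'
--     >>> create_palindrome_v1(9, 1)
--     '98765432123456789'
--
--     """
--     # your code is here
--
--     if start == end:
--         return str(start)
--
--     result = str(start)
--
--     if start < end:
--         return result + create_palindrome_v1(start+1,end) + result
--
--     elif start > end:
--         return result + create_palindrome_v1(start-1,end) + result
-- ===== SOURCE B (Python) =====
-- def create_palindrome_v1(start, end):
--     nums = list(range(start, end + 1)) if start <= end else list(range(start, end - 1, -1))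
--     forward = "".join(str(n) for n in nums)
--     return forward + "".join(str(n) for n in reversed(nums[:-1]))
-- ===== Notes on version B (the rewrite author's own statement) =====
-- stated objective: alternative
-- what changed: Replaces A's recursive result+inner+result string nesting by a flat iterative build: compute the integer range first, join it forward, then append the join of the reversed init; Pre_ excludes pairs more than 9000 apart, near/over CPython's recursion limit where A raises RecursionError.
import Mathlib
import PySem

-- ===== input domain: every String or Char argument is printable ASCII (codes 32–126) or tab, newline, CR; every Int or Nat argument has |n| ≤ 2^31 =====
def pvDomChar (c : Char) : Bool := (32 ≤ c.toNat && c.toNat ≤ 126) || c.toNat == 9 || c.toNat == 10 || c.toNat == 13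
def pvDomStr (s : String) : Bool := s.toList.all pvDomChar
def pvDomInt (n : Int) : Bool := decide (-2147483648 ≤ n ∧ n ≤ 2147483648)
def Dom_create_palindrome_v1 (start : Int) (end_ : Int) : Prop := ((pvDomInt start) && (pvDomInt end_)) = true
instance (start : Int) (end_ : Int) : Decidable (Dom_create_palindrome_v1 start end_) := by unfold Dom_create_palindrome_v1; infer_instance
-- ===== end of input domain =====

-- ===== PORT A =====
-- One honest line: B replaces A's recursive result+inner+result nesting by a flat join over an
-- explicit range plus the reverse of its init (objective: alternative, same cost class).
def create_palindrome_v1 (start : Int) (end_ : Int) : String :=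
  if start = end_ then PySem.Int.toStr start
  else
    let result := PySem.Int.toStr start
    if start < end_ then
      result ++ create_palindrome_v1 (start + 1) end_ ++ result
    else
      result ++ create_palindrome_v1 (start - 1) end_ ++ result
termination_by (end_ - start).natAbs
decreasing_by all_goals omega

-- ===== PORT B =====
-- nums[:-1] is PySem.List.slice nums none (some (-1)); reversed(..) is List.reverse;
-- "".join(str(n) for n in ..) is PySem.Str.join "" of the mapped strings.
def create_palindrome_v1_alt (start : Int) (end_ : Int) : String :=
  let nums : List Int :=
    if start ≤ end_ then PySem.List.pyRange start (end_ + 1) 1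
    else PySem.List.pyRange start (end_ - 1) (-1)
  let forward := PySem.Str.join "" (nums.map PySem.Int.toStr)
  forward ++ PySem.Str.join "" (((PySem.List.slice nums none (some (-1))).reverse).map PySem.Int.toStr)

-- ===== PRECONDITION & SPEC =====
-- Pre_ excludes pairs more than 9000 apart: there A's recursion depth approaches CPython's default
-- recursion limit and A raises RecursionError (the exact overflow point depends on the caller's
-- stack depth, so a safe margin is used; some returning inputs just below the limit are excluded too).
def Pre_create_palindrome_v1 (start : Int) (end_ : Int) : Prop := (end_ - start).natAbs ≤ 9000
instance (start : Int) (end_ : Int) : Decidable (Pre_create_palindrome_v1 start end_) := by unfold Pre_create_palindrome_v1; infer_instance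
def pvWitness_create_palindrome_v1 : Int × Int := (3, 5)

def Spec_create_palindrome_v1 (start : Int) (end_ : Int) (out : String) : Prop := out = create_palindrome_v1_alt start end_
instance (start : Int) (end_ : Int) (out : String) : Decidable (Spec_create_palindrome_v1 start end_ out) := by unfold Spec_create_palindrome_v1; infer_instance

-- ===== CLAIM (what is proved, stated in full; the proofs are below) =====
def Claim_equal_create_palindrome_v1 : Prop := ∀ (start : Int) (end_ : Int), Dom_create_palindrome_v1 start end_ → Pre_create_palindrome_v1 start end_ → Spec_create_palindrome_v1 start end_ (create_palindrome_v1 start end_)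

-- ===== LEMMAS AND PROOFS =====

-- the integer sequence B builds (proof-side name for the 'nums' of the port)
def pvNums (start end_ : Int) : List Int :=
  if start ≤ end_ then PySem.List.pyRange start (end_ + 1) 1
  else PySem.List.pyRange start (end_ - 1) (-1)

theorem join_nil_cons (x : List Char) (xs : List (List Char)) :
    PySem.Chars.join [] (x :: xs) = x ++ PySem.Chars.join [] xs := by
  cases xs <;> simp [PySem.Chars.join, List.intercalate, List.intersperse]

theorem join_nil_eq_flatten (xss : List (List Char)) :
    PySem.Chars.join [] xss = xss.flatten := by
  induction xss with
  | nil => simp [PySem.Chars.join, List.intercalate]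
  | cons x xs ih => rw [join_nil_cons, ih, List.flatten_cons]

-- B at the list-of-chars level, through pvNums
theorem alt_toList (start end_ : Int) :
    (create_palindrome_v1_alt start end_).toList =
      ((pvNums start end_).map PySem.Int.toChars).flatten ++
      (((pvNums start end_).dropLast.reverse).map PySem.Int.toChars).flatten := by
  simp [create_palindrome_v1_alt, pvNums, PySem.Str.toList_join, PySem.List.slice_to_neg_one,
    List.map_map, Function.comp_def, PySem.Int.toList_toStr, join_nil_eq_flatten]

theorem pvNums_self (a : Int) : pvNums a a = [a] := by
  simp [pvNums, PySem.List.pyRange_one_singleton]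

theorem pvNums_ne_nil (start end_ : Int) : pvNums start end_ ≠ [] := by
  unfold pvNums
  split_ifs with h
  · intro hnil
    have : start ∈ PySem.List.pyRange start (end_ + 1) 1 := by
      rw [PySem.List.mem_pyRange_one]; omega
    rw [hnil] at this; exact absurd this (List.not_mem_nil)
  · intro hnil
    have : start ∈ PySem.List.pyRange start (end_ - 1) (-1) := by
      rw [PySem.List.mem_pyRange_neg_one]; omega
    rw [hnil] at this; exact absurd this (List.not_mem_nil)

theorem pvNums_cons_up (start end_ : Int) (h : start < end_) :
    pvNums start end_ = start :: pvNums (start + 1) end_ := by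
  unfold pvNums
  rw [if_pos (le_of_lt h), if_pos (by omega : start + 1 ≤ end_)]
  exact PySem.List.pyRange_one_cons (by omega)

theorem pvNums_cons_down (start end_ : Int) (h : end_ < start) :
    pvNums start end_ = start :: pvNums (start - 1) end_ := by
  unfold pvNums
  rw [if_neg (by omega), PySem.List.pyRange_neg_one_cons (by omega)]
  by_cases h1 : start - 1 ≤ end_
  · have he : start - 1 = end_ := by omega
    rw [if_pos h1, he, PySem.List.pyRange_one_singleton]
    rw [PySem.List.pyRange_neg_one_cons (by omega), PySem.List.pyRange_neg_one_eq_nil (by omega)]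
  · rw [if_neg h1]

-- the generic step of B: peeling the head of pvNums
theorem alt_step (s e s' : Int) (h : pvNums s e = s :: pvNums s' e) :
    (create_palindrome_v1_alt s e).toList =
      PySem.Int.toChars s ++ (create_palindrome_v1_alt s' e).toList ++ PySem.Int.toChars s := by
  rw [alt_toList, alt_toList, h,
    List.dropLast_cons_of_ne_nil (pvNums_ne_nil s' e)]
  simp [List.append_assoc]

theorem alt_self (a : Int) : create_palindrome_v1_alt a a = PySem.Int.toStr a := by
  apply String.toList_inj.mp
  rw [alt_toList, pvNums_self]
  simp [PySem.Int.toList_toStr]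

theorem pv_key : ∀ (n : Nat) (s e : Int), (e - s).natAbs = n →
    create_palindrome_v1 s e = create_palindrome_v1_alt s e := by
  intro n
  induction n with
  | zero =>
    intro s e hn
    have hse : s = e := by omega
    subst hse
    rw [create_palindrome_v1, if_pos rfl, alt_self]
  | succ n ih =>
    intro s e hn
    have hne : s ≠ e := by omega
    apply String.toList_inj.mp
    by_cases hlt : s < e
    · rw [create_palindrome_v1, if_neg hne, if_pos hlt,
        ih (s + 1) e (by omega), alt_step s e (s + 1) (pvNums_cons_up s e hlt)]
      simp [PySem.Int.toList_toStr]
    · have hgt : e < s := by omega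
      rw [create_palindrome_v1, if_neg hne, if_neg hlt,
        ih (s - 1) e (by omega), alt_step s e (s - 1) (pvNums_cons_down s e hgt)]
      simp [PySem.Int.toList_toStr]

-- ===== VERDICT (by name: the statement is the Claim_ definition above) =====
theorem create_palindrome_v1_spec : Claim_equal_create_palindrome_v1 := by
  intro s e _ _
  unfold Spec_create_palindrome_v1
  exact pv_key ((e - s).natAbs) s e rfl
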